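-- pv_equiv track=rewrite | github.com/Jingik/Practice_codingtest | 백준/Gold/2138. 전구와 스위치/전구와 스위치.py | solve
-- ===== SOURCE A (Python) =====
-- def toggle(arr, i, N):
--     # i 번째 스위치를 눌렀을 때 전구 상태를 토글
--     if i > 0:
--         arr[i - 1] = '0' if arr[i - 1] == '1' else '1'
--     arr[i] = '0' if arr[i] == '1' else '1'
--     if i < N - 1:
--         arr[i + 1] = '0' if arr[i + 1] == '1' else '1'
--
-- def solve(N, current, target):
--     # 첫 번째 스위치를 누르지 않는 경우와 누르는 경우를 각각 처리
--     arr1 = current[:]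
--     arr2 = current[:]
--
--     # 1. 첫 번째 스위치를 누르지 않는 경우
--     count1 = 0
--     for i in range(1, N):
--         if arr1[i - 1] != target[i - 1]:
--             toggle(arr1, i, N)
--             count1 += 1
--
--     # 2. 첫 번째 스위치를 누르는 경우
--     toggle(arr2, 0, N)
--     count2 = 1
--     for i in range(1, N):
--         if arr2[i - 1] != target[i - 1]:
--             toggle(arr2, i, N)
--             count2 += 1
--
--     # 가능한지 확인하고 최소값 반환
--     if arr1 == target and arr2 == target:
--         return min(count1, count2)
--     elif arr1 == target:
--         return count1
--     elif arr2 == target: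
--         return count2
--     else:
--         return -1
-- ===== SOURCE B (Python) =====
-- def toggled(s, k):
--     # bulb state after being toggled k times
--     if k == 0:
--         return s
--     if s == '1':
--         return '0' if k % 2 else '1'
--     return '1' if k % 2 else '0'
--
-- def presses_at(press, j):
--     # presses whose toggle window covers bulb j: switch j-1 (it pushes right
--     # unless it is the last switch of the row), switch j itself, switch j+1
--     k = 0
--     if 1 <= j < len(press):
--         k += press[j - 1]
--     if j < len(press):
--         k += press[j]
--     if j + 1 < len(press):
--         k += press[j + 1]
--     return k
--
-- def solve(N, current, target):
--     best = None
--     for first in (0, 1):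
--         # greedy: press[i] = 1 iff switch i is pressed; bulb i-1 is forced
--         # by the time switch i is decided, its state depends on the last two bits
--         press = [first]
--         for i in range(1, N):
--             if toggled(current[i - 1], sum(press[-2:])) == target[i - 1]:
--                 press.append(0)
--             else:
--                 press.append(1)
--         final = [toggled(s, presses_at(press, j)) for j, s in enumerate(current)]
--         if final == target:
--             cnt = sum(press)
--             best = cnt if best is None else min(best, cnt)
--     return best if best is not None else -1
-- ===== Notes on version B (the rewrite author's own statement) =====
-- stated objective: simpler
-- what changed: B replaces A's two mutated bulb arrays and their repeated full-array comparisons by a per-choice list of 0/1 press decisions (each chosen from the sum of the last two decisions) plus one functional pass that rebuilds every bulb from the presses whose window covers it; Pre_ excludes shapes (N larger than the lists, or N <= 0 with an empty list) on which A usually raises IndexError and otherwise returns only when its data-dependent toggles happen to stop short of the missing cell.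
-- outside the precondition, e.g. on solve(5, ['0', '0', '0', '0'], ['x', 'x', '0', '1']): A returns -1, B returns -1
import Mathlib
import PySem

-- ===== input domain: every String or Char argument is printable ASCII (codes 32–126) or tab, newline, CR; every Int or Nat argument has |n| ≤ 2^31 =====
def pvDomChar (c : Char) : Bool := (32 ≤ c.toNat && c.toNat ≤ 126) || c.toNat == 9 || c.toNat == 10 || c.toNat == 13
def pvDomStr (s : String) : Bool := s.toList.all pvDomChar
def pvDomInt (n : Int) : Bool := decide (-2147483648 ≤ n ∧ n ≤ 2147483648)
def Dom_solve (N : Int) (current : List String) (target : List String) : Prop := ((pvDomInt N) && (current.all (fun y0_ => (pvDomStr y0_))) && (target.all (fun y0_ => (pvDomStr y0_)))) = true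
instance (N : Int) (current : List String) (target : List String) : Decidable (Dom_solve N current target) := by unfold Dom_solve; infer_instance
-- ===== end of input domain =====

-- B drops A's two mutated bulb arrays: per first-switch choice it records the 0/1 press
-- decisions in a list and rebuilds the final bulb states in one functional pass; objective:
-- simpler.  A copies `current` before mutating, so neither program mutates its arguments.

-- ===== PORT A =====
-- '0' if x == '1' else '1'
def pvFlip (s : String) : String := if s = "1" then "0" else "1"
-- arr[i] = v ; exact for 0 ≤ i < len(arr), which holds at every call site admitted by Pre_solve
def pvSetI (arr : List String) (i : Int) (v : String) : List String := arr.set i.toNat v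

def toggleA (arr : List String) (i : Int) (N : Int) : List String :=
  let a1 := if i > 0 then pvSetI arr (i-1) (pvFlip (PySem.List.pyGetD arr (i-1) "")) else arr
  let a2 := pvSetI a1 i (pvFlip (PySem.List.pyGetD a1 i ""))
  if i < N - 1 then pvSetI a2 (i+1) (pvFlip (PySem.List.pyGetD a2 (i+1) "")) else a2

def stepA (N : Int) (target : List String) (st : List String × Int) (i : Int) : List String × Int :=
  if PySem.List.pyGetD st.1 (i-1) "" ≠ PySem.List.pyGetD target (i-1) "" then
    (toggleA st.1 i N, st.2 + 1)
  else st

def solve (N : Int) (current : List String) (target : List String) : Int :=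
  let r1 := (PySem.List.pyRange 1 N 1).foldl (stepA N target) (current, 0)
  let r2 := (PySem.List.pyRange 1 N 1).foldl (stepA N target) (toggleA current 0 N, 1)
  if r1.1 = target ∧ r2.1 = target then min r1.2 r2.2
  else if r1.1 = target then r1.2
  else if r2.1 = target then r2.2
  else -1

-- ===== PORT B =====
-- bulb state after its neighbourhood was pressed k times
def toggledB (s : String) (k : Int) : String :=
  if k = 0 then s
  else if s = "1" then (if PySem.Int.mod k 2 ≠ 0 then "0" else "1")
  else (if PySem.Int.mod k 2 ≠ 0 then "1" else "0")

def stepB (current target : List String) (P : List Int) (i : Int) : List Int :=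
  if toggledB (PySem.List.pyGetD current (i-1) "") ((PySem.List.slice P (some (-2)) none).sum)
      = PySem.List.pyGetD target (i-1) "" then P ++ [0] else P ++ [1]

def pressesAtB (press : List Int) (j : Int) : Int :=
  (if 1 ≤ j ∧ j < (press.length : Int) then PySem.List.pyGetD press (j-1) 0 else 0) +
  (if j < (press.length : Int) then PySem.List.pyGetD press j 0 else 0) +
  (if j + 1 < (press.length : Int) then PySem.List.pyGetD press (j+1) 0 else 0)

def finalB (current : List String) (press : List Int) : List String :=
  (PySem.List.enumerate current 0).map (fun js => toggledB js.2 (pressesAtB press js.1))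

def runB (N : Int) (current target : List String) (best : Option Int) (first : Int) : Option Int :=
  let P := (PySem.List.pyRange 1 N 1).foldl (stepB current target) [first]
  if finalB current P = target then
    let cnt := P.sum
    some (match best with | none => cnt | some b => min b cnt)
  else best

def solve_alt (N : Int) (current : List String) (target : List String) : Int :=
  match [(0:Int), 1].foldl (runB N current target) none with
  | some b => b
  | none => -1

-- ===== PRECONDITION & SPEC =====
-- Pre_solve is the closed-form shape guarantee under which A never raises: for N ≥ 1 the loops
-- read current[0..N-1] and target[0..N-2], for N ≤ 0 only current[0] is touched.  On thinner
-- lists A usually raises IndexError; it returns there only when its data-dependent toggles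
-- happen to stop short of the missing index (see claim.json cites for one such excluded input).
def Pre_solve (N : Int) (current : List String) (target : List String) : Prop :=
  (1 ≤ N → N ≤ (current.length : Int) ∧ N - 1 ≤ (target.length : Int)) ∧
  (N ≤ 0 → 1 ≤ current.length)
instance (N : Int) (current : List String) (target : List String) : Decidable (Pre_solve N current target) := by
  unfold Pre_solve; infer_instance

def pvWitness_solve : Int × List String × List String := (3, ["0", "1", "0"], ["1", "1", "1"])

def Spec_solve (N : Int) (current : List String) (target : List String) (out : Int) : Prop := out = solve_alt N current target
instance (N : Int) (current : List String) (target : List String) (out : Int) : Decidable (Spec_solve N current target out) := by unfold Spec_solve; infer_instance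

-- ===== CLAIM (what is proved, stated in full; the proofs are below) =====
def Claim_equal_solve : Prop := ∀ (N : Int) (current : List String) (target : List String), Dom_solve N current target → Pre_solve N current target → Spec_solve N current target (solve N current target)

-- ===== LEMMAS AND PROOFS =====
theorem getElem?_set_flip (l : List String) (k j : Nat) (v : String) (hv : v = pvFlip (l.getD k "")) :
    (l.set k v)[j]? = if j = k then (l[j]?).map pvFlip else l[j]? := by
  subst hv
  rw [List.getElem?_set]
  by_cases hk : k = j
  · subst hk
    by_cases hl : k < l.length
    · simp [hl, List.getD_eq_getElem?_getD]
    · simp [hl]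
  · simp [hk, Ne.symm hk]

theorem getD_set_ne (l : List String) (k k' : Nat) (v : String) (h : k ≠ k') :
    (l.set k v).getD k' "" = l.getD k' "" := by
  simp [List.getD_eq_getElem?_getD, h]

theorem getElem?_toggleA (arr : List String) (i N : Int) (hi : 0 ≤ i) (j : Nat) :
    (toggleA arr i N)[j]? =
      if ((j : Int) = i - 1 ∧ 0 < i) ∨ (j : Int) = i ∨ ((j : Int) = i + 1 ∧ i < N - 1) then
        (arr[j]?).map pvFlip
      else arr[j]? := by
  have hg : ∀ (xs : List String) (k : Int), 0 ≤ k → PySem.List.pyGetD xs k "" = xs.getD k.toNat ""  :=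
    fun xs k hk => PySem.List.pyGetD_of_nonneg xs "" hk
  simp only [toggleA, pvSetI, gt_iff_lt]
  by_cases h1 : 0 < i
  · simp only [if_pos h1]
    rw [hg arr (i-1) (by omega), hg _ i hi]
    by_cases h3 : i < N - 1
    · simp only [if_pos h3]
      rw [hg _ (i+1) (by omega)]
      rw [getElem?_set_flip _ _ j _ (by rw [getD_set_ne _ _ _ _ (by omega), getD_set_ne _ _ _ _ (by omega)])]
      rw [getElem?_set_flip _ _ j _ (by rw [getD_set_ne _ _ _ _ (by omega)])]
      rw [getElem?_set_flip _ _ j _ rfl]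
      split_ifs with a b c d e f g <;> first | rfl | omega
    · simp only [if_neg h3]
      rw [getElem?_set_flip _ _ j _ (by rw [getD_set_ne _ _ _ _ (by omega)])]
      rw [getElem?_set_flip _ _ j _ rfl]
      split_ifs with a b c d e <;> first | rfl | omega
  · have hi0 : i = 0 := by omega
    subst hi0
    simp only [if_neg h1]
    rw [hg arr 0 (by omega)]
    by_cases h3 : (0:Int) < N - 1
    · simp only [if_pos h3]
      rw [hg _ ((0:Int)+1) (by omega)]
      rw [show ((0:Int)+1).toNat = 1 from rfl, show (Int.toNat 0) = 0 from rfl]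
      rw [getElem?_set_flip _ _ j _ (by rw [getD_set_ne _ _ _ _ (by omega)])]
      rw [getElem?_set_flip _ _ j _ rfl]
      split_ifs with a b c d e <;> first | rfl | omega
    · simp only [if_neg h3]
      rw [show (Int.toNat 0) = 0 from rfl]
      rw [getElem?_set_flip _ _ j _ rfl]
      split_ifs with a b c <;> first | rfl | omega

theorem length_toggleA (arr : List String) (i N : Int) : (toggleA arr i N).length = arr.length := by
  simp only [toggleA, pvSetI]
  split_ifs <;> simp

theorem getElem?_eq_some_getD (xs : List String) (j : Nat) (hj : j < xs.length) :
    xs[j]? = some (xs.getD j "") := by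
  rw [List.getD_eq_getElem?_getD, List.getElem?_eq_getElem hj]
  rfl

theorem toggledB_zero (s : String) : toggledB s 0 = s := rfl

theorem pvFlip_eq_toggledB_one (s : String) : pvFlip s = toggledB s 1 := by
  by_cases hs : s = "1" <;> simp [pvFlip, toggledB, hs]

theorem toggledB_succ (s : String) (k : Int) (hk : 0 ≤ k) : pvFlip (toggledB s k) = toggledB s (k + 1) := by
  have h2 : PySem.Int.mod k 2 = k % 2 := PySem.Int.mod_eq_emod_of_pos (by omega)
  have h2' : PySem.Int.mod (k+1) 2 = (k+1) % 2 := PySem.Int.mod_eq_emod_of_pos (by omega)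
  by_cases h0 : k = 0
  · subst h0
    by_cases hs : s = "1" <;> simp [toggledB, pvFlip, hs]
  · have hpar : k % 2 = 0 ∨ k % 2 = 1 := by omega
    rcases hpar with hp | hp
    · have hp1 : (k+1) % 2 = 1 := by omega
      by_cases hs : s = "1" <;>
        simp [toggledB, pvFlip, hs, hp, hp1, h0, show ¬ (k+1) = 0 from by omega]
    · have hp1 : (k+1) % 2 = 0 := by omega
      by_cases hs : s = "1" <;>
        simp [toggledB, pvFlip, hs, hp, hp1, h0, show ¬ (k+1) = 0 from by omega]

-- flips affecting bulb j once all press decisions in P are made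
def cnt3 (P : List Int) (j : Nat) : Int :=
  (if j = 0 then 0 else P.getD (j-1) 0) + P.getD j 0 + P.getD (j+1) 0

-- the two folds, named to keep the invariant readable
def foldA (current target : List String) (first : Int) (N : Int) (m : Nat) : List String × Int :=
  ((List.range m).map (fun k : Nat => ((1:Int) + (k:Int)))).foldl (stepA N target)
    ((if first = 1 then toggleA current 0 N else current), first)

def foldP (current target : List String) (first : Int) (m : Nat) : List Int :=
  ((List.range m).map (fun k : Nat => ((1:Int) + (k:Int)))).foldl (stepB current target) [first]

theorem foldA_succ (current target : List String) (first : Int) (N : Int) (m : Nat) :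
    foldA current target first N (m+1) = stepA N target (foldA current target first N m) (1 + (m:Int)) := by
  unfold foldA
  rw [List.range_succ, List.map_append, List.foldl_append]
  rfl

theorem foldP_succ (current target : List String) (first : Int) (m : Nat) :
    foldP current target first (m+1) = stepB current target (foldP current target first m) (1 + (m:Int)) := by
  unfold foldP
  rw [List.range_succ, List.map_append, List.foldl_append]
  rfl

theorem sum_take3 (Q : List Int) : (Q.take 3).sum = Q.getD 0 0 + Q.getD 1 0 + Q.getD 2 0 := by
  rcases Q with _ | ⟨a, _ | ⟨b, _ | ⟨c, t⟩⟩⟩ <;> simp [List.getD]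
  ring

theorem getD_drop (P : List Int) (a i : Nat) : (P.drop a).getD i 0 = P.getD (a + i) 0 := by
  simp [List.getD_eq_getElem?_getD, List.getElem?_drop]


theorem getD_nonneg01 (P : List Int) (h : ∀ x ∈ P, x = 0 ∨ x = 1) (k : Nat) : 0 ≤ P.getD k 0 := by
  by_cases hk : k < P.length
  · rw [List.getD_eq_getElem?_getD, List.getElem?_eq_getElem hk]
    rcases h _ (List.getElem_mem hk) with h1 | h1 <;> simp [h1]
  · rw [List.getD_eq_default _ _ (by omega)]

theorem cnt3_nonneg (P : List Int) (h : ∀ x ∈ P, x = 0 ∨ x = 1) (j : Nat) : 0 ≤ cnt3 P j := by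
  have h1 := getD_nonneg01 P h (j-1)
  have h2 := getD_nonneg01 P h j
  have h3 := getD_nonneg01 P h (j+1)
  unfold cnt3
  split_ifs <;> omega

theorem cnt3_congr (P Q : List Int) (j : Nat) (h : ∀ k, k ≤ j + 1 → Q.getD k 0 = P.getD k 0) :
    cnt3 Q j = cnt3 P j := by
  unfold cnt3
  rw [h j (by omega), h (j+1) (by omega)]
  split_ifs with h0
  · rfl
  · rw [h (j-1) (by omega)]

theorem pyGetD_int_nat (P : List Int) (k : Nat) : PySem.List.pyGetD P (k:Int) 0 = P.getD k 0 := by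
  rw [PySem.List.pyGetD_of_nonneg P 0 (by omega)]
  simp

theorem pressesAt_lt (P : List Int) (j : Nat) (hj : j < P.length) :
    pressesAtB P (j:Int) = cnt3 P j := by
  unfold pressesAtB cnt3
  rw [if_pos (show ((j:Int) < (P.length:Int)) by exact_mod_cast hj)]
  by_cases h0 : j = 0
  · subst h0
    rw [if_neg (by omega), if_pos rfl, pyGetD_int_nat]
    by_cases h1 : ((0:Nat):Int) + 1 < (P.length:Int)
    · rw [if_pos h1, show ((0:Nat):Int) + 1 = ((1:Nat):Int) by norm_num, pyGetD_int_nat]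
    · rw [if_neg h1, List.getD_eq_default _ _ (show P.length ≤ 0 + 1 by omega)]
  · rw [if_pos ⟨by omega, by exact_mod_cast hj⟩, if_neg h0,
      show (j:Int) - 1 = ((j-1:Nat):Int) by omega, pyGetD_int_nat, pyGetD_int_nat]
    by_cases h1 : (j:Int) + 1 < (P.length:Int)
    · rw [if_pos h1, show (j:Int) + 1 = ((j+1:Nat):Int) by push_cast; ring, pyGetD_int_nat]
    · rw [if_neg h1, List.getD_eq_default _ _ (show P.length ≤ j + 1 by omega)]

theorem pressesAt_ge (P : List Int) (j : Nat) (hj : P.length ≤ j) :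
    pressesAtB P (j:Int) = 0 := by
  unfold pressesAtB
  rw [if_neg (by omega), if_neg (by omega), if_neg (by omega)]
  ring

theorem loop_inv (current target : List String) (first : Int)
    (hf : first = 0 ∨ first = 1) (N : Int)
    (hN : 1 ≤ N) (hlc : N ≤ (current.length : Int))
    (m : Nat) (hm : (m : Int) ≤ N - 1) :
    (foldP current target first m).length = m + 1 ∧
    (∀ x ∈ foldP current target first m, x = 0 ∨ x = 1) ∧
    (foldA current target first N m).1.length = current.length ∧
    (∀ j : Nat, j ≤ m → (foldA current target first N m).1[j]? =
        some (toggledB (current.getD j "") (cnt3 (foldP current target first m) j))) ∧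
    (((m:Int) + 1 < N) → (foldA current target first N m).1[m+1]? =
      some (toggledB (current.getD (m+1) "") ((foldP current target first m).getD m 0))) ∧
    (¬ ((m:Int) + 1 < N) → (foldA current target first N m).1[m+1]? = current[m+1]?) ∧
    (∀ j : Nat, m + 1 < j → (foldA current target first N m).1[j]? = current[j]?) ∧
    (foldA current target first N m).2 = (foldP current target first m).sum := by
  induction m with
  | zero =>
    have h0lc : 0 < current.length := by omega
    refine ⟨rfl, ?_, ?_, ?_, ?_, ?_, ?_, ?_⟩
    · intro x hx
      rw [foldP, List.range_zero, List.map_nil, List.foldl_nil, List.mem_singleton] at hx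
      subst hx; exact hf
    · rcases hf with hf | hf <;> subst hf <;>
        simp [foldA, length_toggleA]
    · intro j hj
      have hj0 : j = 0 := by omega
      subst hj0
      have hc : cnt3 (foldP current target first 0) 0 = first := by
        simp [foldP, cnt3, List.getD]
      rw [hc]
      rcases hf with hf | hf <;> subst hf
      · simp only [foldA, List.range_zero, List.map_nil, List.foldl_nil,
          show ((0:Int) = 1) = False from by simp, if_false]
        rw [getElem?_eq_some_getD current 0 h0lc, toggledB_zero]
      · simp only [foldA, List.range_zero, List.map_nil, List.foldl_nil, if_true]
        rw [getElem?_toggleA current 0 N le_rfl 0, if_pos (by right; left; omega)]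
        rw [getElem?_eq_some_getD current 0 h0lc]
        simp only [Option.map_some]
        rw [pvFlip_eq_toggledB_one]
    · intro h1
      have h1' : 1 < current.length := by omega
      have hP0 : (foldP current target first 0).getD 0 0 = first := by simp [foldP]
      rw [hP0]
      rcases hf with hf | hf <;> subst hf
      · simp only [foldA, List.range_zero, List.map_nil, List.foldl_nil,
          show ((0:Int) = 1) = False from by simp, if_false]
        rw [getElem?_eq_some_getD current 1 h1', toggledB_zero]
      · simp only [foldA, List.range_zero, List.map_nil, List.foldl_nil, if_true]
        rw [getElem?_toggleA current 0 N le_rfl 1,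
          if_pos (by right; right; exact ⟨by omega, by omega⟩)]
        rw [getElem?_eq_some_getD current 1 h1']
        simp only [Option.map_some]
        rw [pvFlip_eq_toggledB_one]
    · intro h1
      rcases hf with hf | hf <;> subst hf
      · simp [foldA]
      · simp only [foldA, List.range_zero, List.map_nil, List.foldl_nil, if_true]
        rw [getElem?_toggleA current 0 N le_rfl 1, if_neg (by omega)]
    · intro j hj
      rcases hf with hf | hf <;> subst hf
      · simp [foldA]
      · simp only [foldA, List.range_zero, List.map_nil, List.foldl_nil, if_true]
        rw [getElem?_toggleA current 0 N le_rfl j, if_neg (by omega)]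
    · rcases hf with hf | hf <;> subst hf <;> simp [foldA, foldP]
  | succ m ih =>
    have hm' : (m : Int) ≤ N - 1 := by push_cast at hm ⊢; omega
    obtain ⟨iL, iE, ilen, i4, i5a, i5b, i6, i7⟩ := ih hm'
    rw [foldA_succ, foldP_succ]
    set A := foldA current target first N m with hA
    set P := foldP current target first m with hP
    have hm2n : m + 2 ≤ current.length := by
      have : ((m:Nat):Int) + 2 ≤ (current.length : Int) := by push_cast at hm; omega
      exact_mod_cast this
    have hm1lt : m + 1 < current.length := by omega
    have hmN : (m:Int) + 1 < N := by push_cast at hm; omega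
    have hPm1 : P.getD (m+1) 0 = 0 := List.getD_eq_default _ _ (by omega)
    have hgA : PySem.List.pyGetD A.1 (1 + (m:Int) - 1) "" = toggledB (current.getD m "") (cnt3 P m) := by
      rw [show (1 + (m:Int) - 1) = ((m:Nat):Int) by omega,
        PySem.List.pyGetD_of_nonneg A.1 "" (by omega)]
      simp only [Int.toNat_natCast]
      rw [List.getD_eq_getElem?_getD, i4 m le_rfl]
      rfl
    have hgC : PySem.List.pyGetD current (1 + (m:Int) - 1) "" = current.getD m "" := by
      rw [show (1 + (m:Int) - 1) = ((m:Nat):Int) by omega,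
        PySem.List.pyGetD_of_nonneg current "" (by omega)]
      simp only [Int.toNat_natCast]
    have hgT : PySem.List.pyGetD target (1 + (m:Int) - 1) "" = target.getD m "" := by
      rw [show (1 + (m:Int) - 1) = ((m:Nat):Int) by omega,
        PySem.List.pyGetD_of_nonneg target "" (by omega)]
      simp only [Int.toNat_natCast]
    have hslice : (PySem.List.slice P (some (-2)) none).sum = cnt3 P m := by
      rw [PySem.List.slice_from_neg_ofNat P 2 (by omega), iL]
      rw [← List.take_of_length_le (l := P.drop (m+1-2)) (i := 3) (by rw [List.length_drop, iL]; omega)]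
      rw [sum_take3, getD_drop, getD_drop, getD_drop]
      by_cases h0 : m = 0
      · subst h0
        have h2 : P.getD 2 0 = 0 := List.getD_eq_default _ _ (by omega)
        have h2' : P[2]?.getD 0 = 0 := by rw [← List.getD_eq_getElem?_getD]; exact h2
        unfold cnt3
        norm_num [h2, h2']
      · rw [show m+1-2 = m-1 by omega, show m-1+1 = m by omega, show m-1+2 = m+1 by omega]
        simp [cnt3, h0]
    -- getD facts for the appended list
    have hgle : ∀ (c : Int) (k : Nat), k ≤ m → (P ++ [c]).getD k 0 = P.getD k 0 :=
      fun c k hk => List.getD_append P [c] 0 k (by omega)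
    have hgm1 : ∀ c : Int, (P ++ [c]).getD (m+1) 0 = c := by
      intro c
      rw [List.getD_append_right P [c] 0 (m+1) (by omega), iL]
      simp
    have hgbig : ∀ (c : Int) (k : Nat), m + 1 < k → (P ++ [c]).getD k 0 = 0 :=
      fun c k hk => List.getD_eq_default _ _ (by simp [iL]; omega)
    have hc3lt : ∀ (c : Int) (j : Nat), j < m → cnt3 (P ++ [c]) j = cnt3 P j :=
      fun c j hj => cnt3_congr P (P ++ [c]) j (fun k hk => hgle c k (by omega))
    have hc3m : ∀ c : Int, cnt3 (P ++ [c]) m = cnt3 P m + c := by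
      intro c
      unfold cnt3
      rw [hgm1 c, hgle c m le_rfl, hPm1]
      split_ifs with h0
      · subst h0; ring
      · rw [hgle c (m-1) (by omega)]; ring
    have hc3m1 : ∀ c : Int, cnt3 (P ++ [c]) (m+1) = P.getD m 0 + c := by
      intro c
      unfold cnt3
      rw [if_neg (by omega), show m+1-1 = m from by omega, hgle c m le_rfl, hgm1 c,
        hgbig c (m+2) (by omega)]
      ring
    have hmemapp : ∀ (c : Int), c = 0 ∨ c = 1 → ∀ x ∈ P ++ [c], x = 0 ∨ x = 1 := by
      intro c hc x hx
      rw [List.mem_append, List.mem_singleton] at hx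
      rcases hx with hx | hx
      · exact iE x hx
      · subst hx; exact hc
    by_cases hcond : toggledB (current.getD m "") (cnt3 P m) = target.getD m ""
    · -- no press at switch m+1
      have hAstep : stepA N target A (1 + (m:Int)) = A := by
        simp only [stepA, hgA, hgT, ne_eq, hcond, not_true_eq_false, if_false]
      have hPstep : stepB current target P (1 + (m:Int)) = P ++ [0] := by
        simp only [stepB, hgC, hgT, hslice, if_pos hcond]
      rw [hAstep, hPstep]
      refine ⟨by simp [iL], hmemapp 0 (Or.inl rfl), ilen, ?_, ?_, ?_, fun j hj => i6 j (by omega), by simp [i7]⟩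
      · intro j hj
        rcases (by omega : j < m ∨ j = m ∨ j = m + 1) with h | h | h
        · rw [i4 j (by omega), hc3lt 0 j h]
        · rw [h, i4 m le_rfl, hc3m 0, add_zero]
        · rw [h, i5a hmN, hc3m1 0, add_zero]
      · intro h2
        have h2' : m + 2 < current.length := by push_cast at h2; omega
        rw [i6 (m+2) (by omega), getElem?_eq_some_getD current (m+2) h2', hgm1 0, toggledB_zero]
      · intro _
        exact i6 (m+2) (by omega)
    · -- press switch m+1
      have hAstep : stepA N target A (1 + (m:Int)) = (toggleA A.1 (1 + (m:Int)) N, A.2 + 1) := by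
        simp only [stepA, hgA, hgT, ne_eq, hcond, not_false_eq_true, if_true]
      have hPstep : stepB current target P (1 + (m:Int)) = P ++ [1] := by
        simp only [stepB, hgC, hgT, hslice, if_neg hcond]
      rw [hAstep, hPstep]
      refine ⟨by simp [iL], hmemapp 1 (Or.inr rfl), by simp [length_toggleA, ilen], ?_, ?_, ?_, ?_, ?_⟩
      · intro j hj
        rw [getElem?_toggleA A.1 (1 + (m:Int)) N (by omega) j]
        rcases (by omega : j < m ∨ j = m ∨ j = m + 1) with h | h | h
        · rw [if_neg (by omega), i4 j (by omega), hc3lt 1 j h]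
        · rw [h]
          rw [if_pos (by left; exact ⟨by omega, by omega⟩), i4 m le_rfl]
          simp only [Option.map_some]
          rw [toggledB_succ _ _ (cnt3_nonneg P iE m), hc3m 1]
        · rw [h]
          rw [if_pos (by right; left; omega), i5a hmN]
          simp only [Option.map_some]
          rw [toggledB_succ _ _ (getD_nonneg01 P iE m), hc3m1 1]
      · intro h2
        have h2' : m + 2 < current.length := by push_cast at h2; omega
        rw [getElem?_toggleA A.1 (1 + (m:Int)) N (by omega) (m+2),
          if_pos (by right; right; refine ⟨by omega, by push_cast at h2; omega⟩),
          i6 (m+2) (by omega), getElem?_eq_some_getD current (m+2) h2']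
        simp only [Option.map_some]
        rw [pvFlip_eq_toggledB_one, hgm1 1]
      · intro h2
        rw [getElem?_toggleA A.1 (1 + (m:Int)) N (by omega) (m+2),
          if_neg (by push_cast at h2 ⊢; omega)]
        exact i6 (m+2) (by omega)
      · intro j hj
        rw [getElem?_toggleA A.1 (1 + (m:Int)) N (by omega) j, if_neg (by omega)]
        exact i6 j (by omega)
      · simp [i7]


theorem run_eq (current target : List String) (first : Int)
    (hf : first = 0 ∨ first = 1) (N : Int)
    (hN : 1 ≤ N) (hlc : N ≤ (current.length : Int)) :
    ((PySem.List.pyRange 1 N 1).foldl (stepA N target)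
        ((if first = 1 then toggleA current 0 N else current), first)).1 =
      finalB current ((PySem.List.pyRange 1 N 1).foldl (stepB current target) [first]) ∧
    ((PySem.List.pyRange 1 N 1).foldl (stepA N target)
        ((if first = 1 then toggleA current 0 N else current), first)).2 =
      ((PySem.List.pyRange 1 N 1).foldl (stepB current target) [first]).sum := by
  have hr : PySem.List.pyRange 1 N 1 = (List.range (N-1).toNat).map (fun k : Nat => ((1:Int)+(k:Int))) :=
    PySem.List.pyRange_one 1 N
  have hAfold : ((PySem.List.pyRange 1 N 1).foldl (stepA N target)
      ((if first = 1 then toggleA current 0 N else current), first)) = foldA current target first N ((N-1).toNat) := by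
    rw [hr]; rfl
  have hPfold : ((PySem.List.pyRange 1 N 1).foldl (stepB current target) [first]) = foldP current target first ((N-1).toNat) := by
    rw [hr]; rfl
  obtain ⟨iL, iE, ilen, i4, i5a, i5b, i6, i7⟩ :=
    loop_inv current target first hf N hN hlc ((N-1).toNat) (by omega)
  rw [hAfold, hPfold]
  refine ⟨?_, i7⟩
  apply List.ext_getElem?
  intro j
  have hlenF : (finalB current (foldP current target first ((N-1).toNat))).length = current.length := by
    simp [finalB, PySem.List.length_enumerate]
  by_cases hj : j < current.length
  · have hfin : (finalB current (foldP current target first ((N-1).toNat)))[j]? =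
        some (toggledB (current.getD j "") (pressesAtB (foldP current target first ((N-1).toNat)) (j:Int))) := by
      unfold finalB
      rw [List.getElem?_map, PySem.List.getElem?_enumerate, getElem?_eq_some_getD current j hj]
      simp only [Option.map_some, zero_add]
    rw [hfin]
    by_cases hjN : (j:Int) ≤ N - 1
    · rw [i4 j (by omega), pressesAt_lt _ j (by omega)]
    · have hA : (foldA current target first N ((N-1).toNat)).1[j]? = current[j]? := by
        rcases (by omega : j = (N-1).toNat + 1 ∨ (N-1).toNat + 1 < j) with h | h
        · rw [h]
          exact i5b (by omega)
        · exact i6 j h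
      rw [hA, getElem?_eq_some_getD current j hj, pressesAt_ge _ j (by omega), toggledB_zero]
  · rw [List.getElem?_eq_none (by omega), List.getElem?_eq_none (by omega)]

theorem run_eq0 (current target : List String) (first : Int)
    (hf : first = 0 ∨ first = 1) (N : Int)
    (hN : N ≤ 0) :
    ((PySem.List.pyRange 1 N 1).foldl (stepA N target)
        ((if first = 1 then toggleA current 0 N else current), first)).1 =
      finalB current ((PySem.List.pyRange 1 N 1).foldl (stepB current target) [first]) ∧
    ((PySem.List.pyRange 1 N 1).foldl (stepA N target)
        ((if first = 1 then toggleA current 0 N else current), first)).2 =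
      ((PySem.List.pyRange 1 N 1).foldl (stepB current target) [first]).sum := by
  have hr : PySem.List.pyRange 1 N 1 = [] := PySem.List.pyRange_one_eq_nil (by omega)
  rw [hr]
  simp only [List.foldl_nil]
  constructor
  · apply List.ext_getElem?
    intro j
    have hlenA : (if first = 1 then toggleA current 0 N else current).length = current.length := by
      rcases hf with hf | hf <;> subst hf <;> simp [length_toggleA]
    by_cases hj : j < current.length
    · have hfin : (finalB current [first])[j]? =
          some (toggledB (current.getD j "") (pressesAtB [first] (j:Int))) := by
        unfold finalB
        rw [List.getElem?_map, PySem.List.getElem?_enumerate, getElem?_eq_some_getD current j hj]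
        simp only [Option.map_some, zero_add]
      rw [hfin]
      by_cases hj0 : j = 0
      · subst hj0
        have hp : pressesAtB [first] ((0:Nat):Int) = first := by
          unfold pressesAtB
          rw [if_neg (by omega), if_pos (by simp), if_neg (by simp)]
          simp [PySem.List.pyGetD]
        rw [hp]
        rcases hf with hf | hf <;> subst hf
        · simp only [show ((0:Int) = 1) = False from by simp, if_false]
          rw [getElem?_eq_some_getD current 0 hj, toggledB_zero]
        · simp only [if_true]
          rw [getElem?_toggleA current 0 N le_rfl 0, if_pos (by right; left; omega),
            getElem?_eq_some_getD current 0 hj]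
          simp only [Option.map_some]
          rw [pvFlip_eq_toggledB_one]
      · have hp : pressesAtB [first] ((j:Nat):Int) = 0 := pressesAt_ge [first] j (by simp; omega)
        rw [hp, toggledB_zero]
        rcases hf with hf | hf <;> subst hf
        · simp only [show ((0:Int) = 1) = False from by simp, if_false]
          exact getElem?_eq_some_getD current j hj
        · simp only [if_true]
          rw [getElem?_toggleA current 0 N le_rfl j, if_neg (by omega)]
          exact getElem?_eq_some_getD current j hj
    · rw [List.getElem?_eq_none (by omega), List.getElem?_eq_none (by simp [finalB, PySem.List.length_enumerate]; omega)]
  · rcases hf with hf | hf <;> subst hf <;> simp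

-- ===== VERDICT (by name: the statement is the Claim_ definition above) =====
theorem solve_spec : Claim_equal_solve := by
  intro N current target _ hpre
  obtain ⟨hpos, _⟩ := hpre
  have hrun : ∀ first : Int, first = 0 ∨ first = 1 →
      (((PySem.List.pyRange 1 N 1).foldl (stepA N target)
          ((if first = 1 then toggleA current 0 N else current), first)).1 =
        finalB current ((PySem.List.pyRange 1 N 1).foldl (stepB current target) [first]) ∧
      ((PySem.List.pyRange 1 N 1).foldl (stepA N target)
          ((if first = 1 then toggleA current 0 N else current), first)).2 =
        ((PySem.List.pyRange 1 N 1).foldl (stepB current target) [first]).sum) := by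
    intro first hf
    by_cases hN : 1 ≤ N
    · exact run_eq current target first hf N hN (hpos hN).1
    · exact run_eq0 current target first hf N (by omega)
  obtain ⟨e0, c0⟩ := hrun 0 (Or.inl rfl)
  obtain ⟨e1, c1⟩ := hrun 1 (Or.inr rfl)
  simp only [show ((0:Int) = 1) = False from by simp, if_false, if_true] at e0 c0 e1 c1
  show solve _ _ _ = solve_alt _ _ _
  simp only [solve, solve_alt, List.foldl_cons, List.foldl_nil, runB]
  rw [e0, c0, e1, c1]
  by_cases d0 : finalB current ((PySem.List.pyRange 1 N 1).foldl (stepB current target) [0]) = target <;>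
    by_cases d1 : finalB current ((PySem.List.pyRange 1 N 1).foldl (stepB current target) [1]) = target <;>
      simp [d0, d1]
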